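-- pv_equiv track=rewrite | github.com/VasiliyPortey/PythonTasks_for_VladimirVladimirovichDenisenko | PythonTask12/Task12_2.py | max_znachenie
-- ===== SOURCE A (Python) =====
-- def max_znachenie(stroka, max_znach, i):
--     if int(stroka[i])>max_znach:
--         max_znach=int(stroka[i])
--     if i>0:
--         i = i-1
--         return max_znachenie(stroka, max_znach, i)
--     else:
--         return max_znach
-- ===== SOURCE B (Python) =====
-- def max_znachenie(stroka, max_znach, i):
--     best = max(max_znach, int(stroka[i]))
--     for j in range(i):
--         d = int(stroka[j])
--         if d > best:
--             best = d
--     return best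
-- ===== Notes on version B (the rewrite author's own statement) =====
-- stated objective: simpler
-- what changed: Replaced the tail recursion that walks indices i down to 0 (converting stroka[i] up to twice per step and threading the accumulator through calls) by seeding a running maximum with max(max_znach, int(stroka[i])) and one forward for-loop over range(i), with one int() conversion per index and no recursion.
import Mathlib
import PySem

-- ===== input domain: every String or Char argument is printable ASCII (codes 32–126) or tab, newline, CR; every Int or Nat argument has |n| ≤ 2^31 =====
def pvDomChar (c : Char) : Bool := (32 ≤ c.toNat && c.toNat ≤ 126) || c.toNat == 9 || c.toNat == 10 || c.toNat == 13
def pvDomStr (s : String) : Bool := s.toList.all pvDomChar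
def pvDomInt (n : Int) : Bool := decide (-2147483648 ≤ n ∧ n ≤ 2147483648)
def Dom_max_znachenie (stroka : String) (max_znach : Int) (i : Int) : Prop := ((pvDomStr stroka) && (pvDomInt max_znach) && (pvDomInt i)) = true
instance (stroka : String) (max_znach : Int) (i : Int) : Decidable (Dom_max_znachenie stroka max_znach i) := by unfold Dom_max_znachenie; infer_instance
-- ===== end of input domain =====

-- B replaces A's downward tail recursion by seeding a running maximum with int(stroka[i]) and one
-- forward loop over range(i) (simpler: no recursion, one conversion per index); same value everywhere.


-- ===== PORT A =====
-- int(stroka[j]) — shared subexpression of both Pythons (the getD 0 default is never reached under Pre_)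
def pyIntAt (stroka : String) (j : Int) : Int :=
  ((PySem.Str.pyGet? stroka j).bind (fun c => PySem.Int.ofChars? [c])).getD 0

def max_znachenie (stroka : String) (max_znach : Int) (i : Int) : Int :=
  let v := pyIntAt stroka i
  let m := if v > max_znach then v else max_znach
  if _h : i > 0 then max_znachenie stroka m (i - 1) else m
termination_by i.toNat
decreasing_by omega

-- ===== PORT B =====
def max_znachenie_alt (stroka : String) (max_znach : Int) (i : Int) : Int :=
  let best := max max_znach (pyIntAt stroka i)
  (PySem.List.pyRange 0 i 1).foldl
    (fun best j =>
      let d := pyIntAt stroka j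
      if d > best then d else best)
    best

-- ===== PRECONDITION & SPEC =====
-- Pre_ excludes exactly the inputs where the Pythons raise: an accessed index out of range
-- (IndexError) or a non-digit character at an accessed position (ValueError from int()).
def Pre_max_znachenie (stroka : String) (max_znach : Int) (i : Int) : Prop :=
  if 0 ≤ i then
    i < (stroka.toList.length : Int) ∧ (stroka.toList.take (i.toNat + 1)).all Char.isDigit = true
  else
    0 ≤ (stroka.toList.length : Int) + i ∧
      ((stroka.toList[((stroka.toList.length : Int) + i).toNat]?).map Char.isDigit).getD false = true
instance (stroka : String) (max_znach : Int) (i : Int) : Decidable (Pre_max_znachenie stroka max_znach i) := by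
  unfold Pre_max_znachenie; infer_instance

def pvWitness_max_znachenie : String × Int × Int := ("374", 2, 2)

def Spec_max_znachenie (stroka : String) (max_znach : Int) (i : Int) (out : Int) : Prop :=
  out = max_znachenie_alt stroka max_znach i
instance (stroka : String) (max_znach : Int) (i : Int) (out : Int) : Decidable (Spec_max_znachenie stroka max_znach i out) := by
  unfold Spec_max_znachenie; infer_instance

-- ===== CLAIM (what is proved, stated in full; the proofs are below) =====
def Claim_equal_max_znachenie : Prop := ∀ (stroka : String) (max_znach : Int) (i : Int), Dom_max_znachenie stroka max_znach i → Pre_max_znachenie stroka max_znach i → Spec_max_znachenie stroka max_znach i (max_znachenie stroka max_znach i)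

-- ===== LEMMAS AND PROOFS =====

-- the running-max step shared by both ports' loop bodies
def runMax (d : Int → Int) (b j : Int) : Int := if d j > b then d j else b

lemma runMax_eq_max (d : Int → Int) (b j : Int) : runMax d b j = max b (d j) := by
  unfold runMax
  rw [Int.max_def]
  split_ifs <;> omega

lemma runMax_comm (d : Int → Int) (m a b : Int) :
    runMax d (runMax d m a) b = runMax d (runMax d m b) a := by
  unfold runMax; split_ifs <;> omega

lemma foldl_runMax_swap (d : Int → Int) (l : List Int) (m a : Int) :
    l.foldl (runMax d) (runMax d m a) = runMax d (l.foldl (runMax d) m) a := by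
  induction l generalizing m with
  | nil => rfl
  | cons x l ih => simp only [List.foldl_cons, runMax_comm d m a x, ih]

lemma foldl_runMax_reverse (d : Int → Int) (l : List Int) (m : Int) :
    l.reverse.foldl (runMax d) m = l.foldl (runMax d) m := by
  induction l generalizing m with
  | nil => rfl
  | cons x l ih =>
      simp only [List.reverse_cons, List.foldl_append, List.foldl_cons, List.foldl_nil, ih]
      rw [← foldl_runMax_swap]

-- A on a nonnegative index is the downward running max over indices n, n-1, …, 0
lemma max_znachenie_eq_foldr (stroka : String) (n : Nat) : ∀ m : Int,
    max_znachenie stroka m (n : Int) =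
      (PySem.List.pyRange 0 ((n : Int) + 1) 1).reverse.foldl (runMax (pyIntAt stroka)) m := by
  induction n with
  | zero =>
      intro m
      rw [show ((0 : Nat) : Int) = 0 from rfl]
      rw [max_znachenie]
      rw [dif_neg (by omega : ¬ (0 : Int) > 0)]
      rw [PySem.List.pyRange_one_singleton]
      rfl
  | succ k ih =>
      intro m
      rw [show (((k + 1 : Nat)) : Int) = (k : Int) + 1 by push_cast; ring]
      rw [max_znachenie]
      rw [dif_pos (by positivity : (k : Int) + 1 > 0)]
      rw [show (k : Int) + 1 - 1 = (k : Int) by ring]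
      rw [ih]
      rw [show PySem.List.pyRange 0 ((k : Int) + 1 + 1) 1 =
            PySem.List.pyRange 0 ((k : Int) + 1) 1 ++ [(k : Int) + 1] from
          PySem.List.pyRange_one_succ_right (by positivity)]
      rw [List.reverse_append]
      rfl

-- B is the forward running max seeded with max max_znach (pyIntAt stroka i)
lemma max_znachenie_alt_eq (stroka : String) (m i : Int) :
    max_znachenie_alt stroka m i =
      (PySem.List.pyRange 0 i 1).foldl (runMax (pyIntAt stroka)) (max m (pyIntAt stroka i)) := by
  unfold max_znachenie_alt runMax
  rfl

theorem max_znachenie_spec : Claim_equal_max_znachenie := by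
  intro stroka m i _hdom _hpre
  unfold Spec_max_znachenie
  rw [max_znachenie_alt_eq]
  by_cases hi : 0 ≤ i
  · obtain ⟨n, rfl⟩ : ∃ n : Nat, i = (n : Int) := ⟨i.toNat, (Int.toNat_of_nonneg hi).symm⟩
    rw [max_znachenie_eq_foldr, foldl_runMax_reverse]
    rw [show PySem.List.pyRange 0 ((n : Int) + 1) 1 =
          PySem.List.pyRange 0 (n : Int) 1 ++ [(n : Int)] from
        PySem.List.pyRange_one_succ_right (by positivity)]
    rw [List.foldl_append, List.foldl_cons, List.foldl_nil]
    rw [← foldl_runMax_swap, runMax_eq_max]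
  · rw [max_znachenie]
    rw [dif_neg (by omega : ¬ i > 0)]
    rw [PySem.List.pyRange_one_eq_nil (by omega : i ≤ 0), List.foldl_nil]
    show (if pyIntAt stroka i > m then pyIntAt stroka i else m) = max m (pyIntAt stroka i)
    rw [Int.max_def]
    split_ifs <;> omega
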